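-- pv_equiv track=rewrite | github.com/miriost/Immune2vec | python_files/biovec/models.py | split_ngrams_no_repetitions
-- ===== SOURCE A (Python) =====
-- def split_ngrams_no_repetitions(seq, n, reading_frame):
--     """
--     'acccgtgtctgg', n=3, reading frame = 1: ['acc', 'cgt', 'gtc', 'tgg']
--     reading frame = 2: ['ccc', 'gtg', 'tct']
--     reading frame = 3: ['ccg', 'tgt', 'ctg']
--     """
--     a, b, c = zip(*[iter(seq)]*n), zip(*[iter(seq[1:])]*n), zip(*[iter(seq[2:])]*n)
--     str_ngrams = []
--     for ngrams in [a,b,c]: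
--         x = []
--         for ngram in ngrams:
--             x.append("".join(ngram))
--         str_ngrams.append(x)
--     return str_ngrams[reading_frame-1]
-- ===== SOURCE B (Python) =====
-- def split_ngrams_no_repetitions(seq, n, reading_frame):
--     """
--     'acccgtgtctgg', n=3, reading frame = 1: ['acc', 'cgt', 'gtc', 'tgg']
--     reading frame = 2: ['ccc', 'gtg', 'tct']
--     reading frame = 3: ['ccg', 'tgt', 'ctg']
--     """
--     off = (reading_frame - 1) % 3
--     out = []
--     if n > 0:
--         i = off
--         while i + n <= len(seq):
--             out.append(seq[i:i + n])
--             i += n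
--     return out
-- ===== Notes on version B (the rewrite author's own statement) =====
-- stated objective: simpler
-- what changed: B derives the single requested frame offset as (reading_frame-1) % 3 (reproducing Python's negative list indexing into the 3-frame list) and builds only that frame's n-grams with one offset-driven slicing loop, instead of materialising all three frames via zip(*[iter]*n) and indexing the triple list.
import Mathlib
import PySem

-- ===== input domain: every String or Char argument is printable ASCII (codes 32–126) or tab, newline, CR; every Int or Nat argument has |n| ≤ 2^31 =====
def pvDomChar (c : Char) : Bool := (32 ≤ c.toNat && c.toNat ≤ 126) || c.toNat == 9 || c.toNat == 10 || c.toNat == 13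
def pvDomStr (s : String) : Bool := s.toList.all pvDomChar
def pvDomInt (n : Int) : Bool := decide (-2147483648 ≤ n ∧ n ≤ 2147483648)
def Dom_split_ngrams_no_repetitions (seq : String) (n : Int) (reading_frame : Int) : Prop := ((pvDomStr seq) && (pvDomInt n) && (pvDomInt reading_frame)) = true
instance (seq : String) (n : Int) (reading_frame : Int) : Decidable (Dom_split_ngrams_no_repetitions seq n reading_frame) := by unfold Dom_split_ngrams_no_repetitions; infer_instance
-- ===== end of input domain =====

-- B computes only the requested reading frame with one offset-driven slicing loop instead of
-- building all three frames; objective: simpler.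

-- ===== PORT A =====
-- zip(*[iter(xs)]*n): consecutive chunks of n, dropping the incomplete tail (empty when n ≤ 0,
-- matching zip() of no iterators).
def pvChunks (n : Nat) (l : List Char) : List (List Char) :=
  if h : 0 < n ∧ n ≤ l.length then l.take n :: pvChunks n (l.drop n) else []
termination_by l.length
decreasing_by simp; omega

def split_ngrams_no_repetitions (seq : String) (n : Int) (reading_frame : Int) : List String :=
  -- a, b, c = zip(*[iter(seq)]*n), zip(*[iter(seq[1:])]*n), zip(*[iter(seq[2:])]*n)
  let a := pvChunks n.toNat seq.toList
  let b := pvChunks n.toNat (PySem.List.slice seq.toList (some 1) none)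
  let c := pvChunks n.toNat (PySem.List.slice seq.toList (some 2) none)
  -- str_ngrams = []; for ngrams in [a,b,c]: x = []; for ngram in ngrams: x.append("".join(ngram)); str_ngrams.append(x)
  let str_ngrams := [a, b, c].foldl
    (fun str_ngrams ngrams =>
      str_ngrams ++ [ngrams.foldl (fun x ngram => x ++ [String.mk ngram]) []]) []
  -- return str_ngrams[reading_frame-1]; none = IndexError, excluded by Pre_
  (PySem.List.pyGet? str_ngrams (reading_frame - 1)).getD []

-- ===== PORT B =====
-- while i + n <= len(seq): out.append(seq[i:i+n]); i += n   (entered only when 0 < n)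
def pvWhile (l : List Char) (n : Int) (i : Int) (hn : 0 < n) : List String :=
  if h : i + n ≤ (l.length : Int) then
    String.mk (PySem.List.slice l (some i) (some (i + n))) :: pvWhile l n (i + n) hn
  else []
termination_by ((l.length : Int) - i).toNat
decreasing_by omega

def split_ngrams_no_repetitions_alt (seq : String) (n : Int) (reading_frame : Int) : List String :=
  -- off = (reading_frame - 1) % 3
  let off := PySem.Int.mod (reading_frame - 1) 3
  -- out = []; if n > 0: i = off; while i + n <= len(seq): out.append(seq[i:i+n]); i += n
  if hn : 0 < n then pvWhile seq.toList n off hn else []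

-- ===== PRECONDITION & SPEC =====
-- Pre_ excludes exactly the reading_frames outside -2..3, on which A raises IndexError
-- indexing the 3-element frame list (A returns no value there).
def Pre_split_ngrams_no_repetitions (seq : String) (n : Int) (reading_frame : Int) : Prop :=
  -2 ≤ reading_frame ∧ reading_frame ≤ 3
instance (seq : String) (n : Int) (reading_frame : Int) : Decidable (Pre_split_ngrams_no_repetitions seq n reading_frame) := by unfold Pre_split_ngrams_no_repetitions; infer_instance

def pvWitness_split_ngrams_no_repetitions : String × Int × Int := ("acccgtgtctgg", 3, 2)


def Spec_split_ngrams_no_repetitions (seq : String) (n : Int) (reading_frame : Int) (out : List String) : Prop := out = split_ngrams_no_repetitions_alt seq n reading_frame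
instance (seq : String) (n : Int) (reading_frame : Int) (out : List String) : Decidable (Spec_split_ngrams_no_repetitions seq n reading_frame out) := by unfold Spec_split_ngrams_no_repetitions; infer_instance

-- ===== CLAIM (what is proved, stated in full; the proofs are below) =====
def Claim_equal_split_ngrams_no_repetitions : Prop := ∀ (seq : String) (n : Int) (reading_frame : Int), Dom_split_ngrams_no_repetitions seq n reading_frame → Pre_split_ngrams_no_repetitions seq n reading_frame → Spec_split_ngrams_no_repetitions seq n reading_frame (split_ngrams_no_repetitions seq n reading_frame)

-- ===== LEMMAS AND PROOFS =====

-- pvChunks with chunk size 0 is empty (n ≤ 0 case of A: zip() of no iterators).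
theorem pvChunks_zero (xs : List Char) : pvChunks 0 xs = [] := by
  rw [pvChunks, dif_neg (by omega)]

-- B's while loop from offset i equals String.mk mapped over A's chunking of seq[i:].
theorem pvWhile_eq_chunks (l : List Char) (n : Int) (hn : 0 < n) (i : Int) (hi : 0 ≤ i) :
    pvWhile l n i hn = (pvChunks n.toNat (l.drop i.toNat)).map String.mk := by
  rw [pvWhile, pvChunks]
  have hlen : (l.drop i.toNat).length = l.length - i.toNat := by simp
  by_cases h : i + n ≤ (l.length : Int)
  · rw [dif_pos h, dif_pos (by omega)]
    rw [PySem.List.slice_toNat _ hi (by omega)]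
    have e2 : (i + n).toNat - i.toNat = n.toNat := by omega
    rw [e2, pvWhile_eq_chunks l n hn (i + n) (by omega)]
    have e3 : (i + n).toNat = i.toNat + n.toNat := by omega
    simp [e3, List.drop_drop, Nat.add_comm]
  · rw [dif_neg h, dif_neg (by omega)]
    simp
termination_by ((l.length : Int) - i).toNat
decreasing_by omega

-- ===== VERDICT (by name: the statement is the Claim_ definition above) =====
theorem split_ngrams_no_repetitions_spec : Claim_equal_split_ngrams_no_repetitions := by
  intro seq n reading_frame _ hpre
  obtain ⟨h1, h2⟩ := hpre
  unfold Spec_split_ngrams_no_repetitions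
  unfold split_ngrams_no_repetitions split_ngrams_no_repetitions_alt
  simp only [List.foldl, PySem.List.foldl_append_singleton_eq_map, List.nil_append]
  by_cases hn : 0 < n
  · rw [dif_pos hn]
    rw [PySem.List.slice_from _ (by omega : (0:Int) ≤ 1),
        PySem.List.slice_from _ (by omega : (0:Int) ≤ 2)]
    have hb0 := pvWhile_eq_chunks seq.toList n hn 0 (by omega)
    have hb1 := pvWhile_eq_chunks seq.toList n hn 1 (by omega)
    have hb2 := pvWhile_eq_chunks seq.toList n hn 2 (by omega)
    interval_cases reading_frame <;>
      simp only [PySem.List.pyGet?, PySem.List.pyIdx?, PySem.Int.mod] <;>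
      norm_num <;> simp_all
  · rw [dif_neg hn]
    have hz : n.toNat = 0 := by omega
    rw [hz]
    simp only [pvChunks_zero, List.map_nil]
    interval_cases reading_frame <;> simp [PySem.List.pyGet?, PySem.List.pyIdx?]
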